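-- pv_equiv track=rewrite | github.com/FonsiFernandez/RocketSim | src/rocketsim/ui/dashboard.py | split_segments_by_label
-- ===== SOURCE A (Python) =====
-- def split_segments_by_label(x_vals, y_vals, labels):
--     segments = []
--     if len(x_vals) == 0:
--         return segments
--
--     start = 0
--     current = labels[0]
--
--     for i in range(1, len(labels)):
--         if labels[i] != current:
--             segments.append((x_vals[start:i], y_vals[start:i], current))
--             start = i
--             current = labels[i]
--
--     segments.append((x_vals[start:], y_vals[start:], current))
--     return segments
-- ===== SOURCE B (Python) =====
-- def split_segments_by_label(x_vals, y_vals, labels):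
--     if len(x_vals) == 0:
--         return []
--     bounds = [0] + [i for i in range(1, len(labels)) if labels[i] != labels[i - 1]]
--     segments = [(x_vals[a:b], y_vals[a:b], labels[a]) for a, b in zip(bounds, bounds[1:])]
--     last = bounds[-1]
--     segments.append((x_vals[last:], y_vals[last:], labels[last]))
--     return segments
-- ===== Notes on version B (the rewrite author's own statement) =====
-- stated objective: alternative
-- what changed: Replaces A's single stateful loop (accumulating start/current while emitting) with a two-pass decomposition: first compute the run-boundary indices by comparing each label with its predecessor, then emit all segments by slicing between consecutive boundaries.
import Mathlib
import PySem

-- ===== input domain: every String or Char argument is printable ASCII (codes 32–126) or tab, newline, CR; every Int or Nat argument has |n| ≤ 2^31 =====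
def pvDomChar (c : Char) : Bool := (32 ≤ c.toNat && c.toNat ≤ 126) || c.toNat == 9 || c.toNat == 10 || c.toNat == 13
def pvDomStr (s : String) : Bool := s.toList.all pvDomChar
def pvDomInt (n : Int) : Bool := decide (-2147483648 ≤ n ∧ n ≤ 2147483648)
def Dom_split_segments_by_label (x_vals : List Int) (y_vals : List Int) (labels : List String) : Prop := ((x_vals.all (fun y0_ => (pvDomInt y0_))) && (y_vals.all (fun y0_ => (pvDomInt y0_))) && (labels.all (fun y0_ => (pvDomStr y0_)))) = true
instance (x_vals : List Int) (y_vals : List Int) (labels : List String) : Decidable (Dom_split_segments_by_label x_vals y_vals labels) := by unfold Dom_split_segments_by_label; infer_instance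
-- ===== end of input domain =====

-- B replaces A's single stateful loop with a two-pass decomposition (boundary indices, then slicing); proved equal under Pre_ (alternative, not faster).

-- ===== PORT A =====
-- loop body of A's for-loop (state: segments, start, current)
def pvStepA (x_vals : List Int) (y_vals : List Int) (labels : List String)
    (st : List (List Int × List Int × String) × Int × String) (i : Int) :
    List (List Int × List Int × String) × Int × String :=
  if PySem.List.pyGetD labels i "" ≠ st.2.2 then
    (st.1 ++ [(PySem.List.slice x_vals (some st.2.1) (some i),
               PySem.List.slice y_vals (some st.2.1) (some i), st.2.2)],
     i, PySem.List.pyGetD labels i "")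
  else st

def split_segments_by_label (x_vals : List Int) (y_vals : List Int) (labels : List String) : List (List Int × List Int × String) :=
  if x_vals.length = 0 then []
  else
    let fin := (PySem.List.pyRange 1 labels.length 1).foldl (pvStepA x_vals y_vals labels)
                 ([], 0, PySem.List.pyGetD labels 0 "")
    fin.1 ++ [(PySem.List.slice x_vals (some fin.2.1) none,
               PySem.List.slice y_vals (some fin.2.1) none, fin.2.2)]

-- ===== PORT B =====
-- one bounded segment (x_vals[a:b], y_vals[a:b], labels[a])
def pvSegB (x_vals : List Int) (y_vals : List Int) (labels : List String) (a b : Int) :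
    List Int × List Int × String :=
  (PySem.List.slice x_vals (some a) (some b), PySem.List.slice y_vals (some a) (some b),
   PySem.List.pyGetD labels a "")

-- the trailing segment (x_vals[a:], y_vals[a:], labels[a])
def pvLastB (x_vals : List Int) (y_vals : List Int) (labels : List String) (a : Int) :
    List Int × List Int × String :=
  (PySem.List.slice x_vals (some a) none, PySem.List.slice y_vals (some a) none,
   PySem.List.pyGetD labels a "")

-- the comprehension over zip(bounds, bounds[1:]) plus the appended final segment at bounds[-1]
def pvEmitB (x_vals : List Int) (y_vals : List Int) (labels : List String) (bounds : List Int) :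
    List (List Int × List Int × String) :=
  (bounds.zip (bounds.drop 1)).map (fun ab => pvSegB x_vals y_vals labels ab.1 ab.2)
    ++ [pvLastB x_vals y_vals labels (PySem.List.pyGetD bounds (-1) 0)]

def split_segments_by_label_alt (x_vals : List Int) (y_vals : List Int) (labels : List String) : List (List Int × List Int × String) :=
  if x_vals.length = 0 then []
  else
    pvEmitB x_vals y_vals labels
      (0 :: (PySem.List.pyRange 1 labels.length 1).filter
        (fun i => PySem.List.pyGetD labels i "" ≠ PySem.List.pyGetD labels (i - 1) ""))

-- ===== PRECONDITION & SPEC =====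
-- Pre_ excludes only the inputs where Python A raises IndexError (x_vals nonempty, labels empty: labels[0]); Python B raises there too.
def Pre_split_segments_by_label (x_vals : List Int) (y_vals : List Int) (labels : List String) : Prop :=
  x_vals = [] ∨ labels ≠ []
instance (x_vals : List Int) (y_vals : List Int) (labels : List String) : Decidable (Pre_split_segments_by_label x_vals y_vals labels) := by unfold Pre_split_segments_by_label; infer_instance

def pvWitness_split_segments_by_label : List Int × List Int × List String :=
  ([1, 2, 3], [4, 5, 6], ["a", "a", "b"])

def Spec_split_segments_by_label (x_vals : List Int) (y_vals : List Int) (labels : List String) (out : List (List Int × List Int × String)) : Prop := out = split_segments_by_label_alt x_vals y_vals labels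
instance (x_vals : List Int) (y_vals : List Int) (labels : List String) (out : List (List Int × List Int × String)) : Decidable (Spec_split_segments_by_label x_vals y_vals labels out) := by unfold Spec_split_segments_by_label; infer_instance

-- ===== CLAIM (what is proved, stated in full; the proofs are below) =====
def Claim_equal_split_segments_by_label : Prop := ∀ (x_vals : List Int) (y_vals : List Int) (labels : List String), Dom_split_segments_by_label x_vals y_vals labels → Pre_split_segments_by_label x_vals y_vals labels → Spec_split_segments_by_label x_vals y_vals labels (split_segments_by_label x_vals y_vals labels)

-- ===== LEMMAS AND PROOFS =====

lemma pvEmitB_cons (x_vals y_vals : List Int) (labels : List String) (a b : Int)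
    (rest : List Int) :
    pvEmitB x_vals y_vals labels (a :: b :: rest)
      = pvSegB x_vals y_vals labels a b :: pvEmitB x_vals y_vals labels (b :: rest) := by
  unfold pvEmitB
  rw [PySem.List.pyGetD_neg_one _ _ (by simp), PySem.List.pyGetD_neg_one _ _ (by simp)]
  simp [List.getLast]

-- the bridge: A's loop-then-final from state (segs0, s, labels[s]) over range(t, n) equals
-- segs0 followed by B's emission from boundaries s :: filter(range(t, n))
lemma pvKey (x_vals y_vals : List Int) (labels : List String) :
    ∀ (k : Nat) (s t : Int) (segs0 : List (List Int × List Int × String)),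
      0 ≤ s → s < t →
      (∀ j : Int, s ≤ j → j < t → PySem.List.pyGetD labels j "" = PySem.List.pyGetD labels s "") →
      ((labels.length : Int) - t).toNat = k →
      (let fin := (PySem.List.pyRange t labels.length 1).foldl (pvStepA x_vals y_vals labels)
                    (segs0, s, PySem.List.pyGetD labels s "")
       fin.1 ++ [(PySem.List.slice x_vals (some fin.2.1) none,
                  PySem.List.slice y_vals (some fin.2.1) none, fin.2.2)])
      = segs0 ++ pvEmitB x_vals y_vals labels
          (s :: (PySem.List.pyRange t labels.length 1).filter
            (fun i => PySem.List.pyGetD labels i "" ≠ PySem.List.pyGetD labels (i - 1) "")) := by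
  intro k
  induction k with
  | zero =>
    intro s t segs0 hs hst _ hk
    have ht : (labels.length : Int) ≤ t := by omega
    rw [PySem.List.pyRange_one_eq_nil ht]
    simp [pvEmitB, pvLastB, List.foldl, PySem.List.pyGetD_neg_one _ _ (by simp : [s] ≠ ([] : List Int)), List.getLast]
  | succ k ih =>
    intro s t segs0 hs hst hinv hk
    have ht : t < (labels.length : Int) := by omega
    rw [PySem.List.pyRange_one_cons ht]
    rw [List.filter_cons, List.foldl_cons]
    by_cases h : PySem.List.pyGetD labels t "" = PySem.List.pyGetD labels s ""
    · -- same run: state unchanged, t is not a boundary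
      have hpred : PySem.List.pyGetD labels (t - 1) "" = PySem.List.pyGetD labels s "" :=
        hinv (t - 1) (by omega) (by omega)
      have hstep : pvStepA x_vals y_vals labels (segs0, s, PySem.List.pyGetD labels s "") t
          = (segs0, s, PySem.List.pyGetD labels s "") := by
        simp [pvStepA, h]
      rw [hstep, if_neg (by simp [h, hpred])]
      exact ih s (t + 1) segs0 hs (by omega)
        (fun j hj1 hj2 => by
          by_cases hjt : j < t
          · exact hinv j hj1 hjt
          · have hjeq : j = t := by omega
            subst hjeq; exact h)
        (by omega)
    · -- new run: emit segment [s, t), t is a boundary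
      have hpred : PySem.List.pyGetD labels (t - 1) "" = PySem.List.pyGetD labels s "" :=
        hinv (t - 1) (by omega) (by omega)
      have hstep : pvStepA x_vals y_vals labels (segs0, s, PySem.List.pyGetD labels s "") t
          = (segs0 ++ [(PySem.List.slice x_vals (some s) (some t),
              PySem.List.slice y_vals (some s) (some t), PySem.List.pyGetD labels s "")],
             t, PySem.List.pyGetD labels t "") := by
        simp [pvStepA, h]
      rw [hstep, if_pos (by simp [h, hpred])]
      have hih := ih t (t + 1) (segs0 ++ [(PySem.List.slice x_vals (some s) (some t),
          PySem.List.slice y_vals (some s) (some t), PySem.List.pyGetD labels s "")])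
          (by omega) (by omega)
          (fun j hj1 hj2 => by have hjeq : j = t := (by omega); subst hjeq; rfl)
          (by omega)
      rw [hih, pvEmitB_cons]
      simp [pvSegB]

-- ===== VERDICT (by name: the statement is the Claim_ definition above) =====
theorem split_segments_by_label_spec : Claim_equal_split_segments_by_label := by
  intro x_vals y_vals labels _ hpre
  unfold Spec_split_segments_by_label split_segments_by_label split_segments_by_label_alt
  by_cases hx : x_vals.length = 0
  · simp [hx]
  · simp only [if_neg hx]
    have := pvKey x_vals y_vals labels ((labels.length : Int) - 1).toNat 0 1 []
      (le_refl 0) (by omega)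
      (fun j hj1 hj2 => by have hjeq : j = 0 := (by omega); subst hjeq; rfl)
      rfl
    simpa using this
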